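-- pv_equiv track=rewrite | github.com/Estyms/lunar-base | web/services/grant_service.py | _material_max_amount
-- ===== SOURCE A (Python) =====
-- def _material_max_amount(item_id: int, name: str) -> int:
--     """Return the count to grant for one material in MAX ALL, or 0 to skip."""
--     # Hard exclusions first.
--     if item_id in (999001, 999002, 999003, 999004):
--         return 0
--     n = name.lower()
--     if "longing flicker" in n:
--         return 0
--     if "recalling light" in n:
--         return 0
--     # Specific patterns, first match wins.
--     if "awakening stone" in n or "a. stone" in n:
--         return 5
--     if any(p in n for p in ("battle text", "b. text", "peaceful text", "warfare text", "w. text")):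
--         return 100
--     if "enhancement" in n:
--         return 50_000
--     if "slab fragment" in n or "antler bit" in n:
--         return 20_000
--     # Catch-all
--     return 5_000
-- ===== SOURCE B (Python) =====
-- # Position-major multi-pattern scan: walk the lowercased name once; at each
-- # index record the lowest priority of any pattern starting there; map the best
-- # priority to its amount (default 5000). Same outputs, different traversal.
-- PATTERNS = [
--     ("longing flicker", 0), ("recalling light", 0),
--     ("awakening stone", 1), ("a. stone", 1),
--     ("battle text", 2), ("b. text", 2), ("peaceful text", 2),
--     ("warfare text", 2), ("w. text", 2),
--     ("enhancement", 3),
--     ("slab fragment", 4), ("antler bit", 4),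
-- ]
-- AMOUNTS = (0, 5, 100, 50_000, 20_000)
--
-- def _material_max_amount(item_id: int, name: str) -> int:
--     if item_id in (999001, 999002, 999003, 999004):
--         return 0
--     n = name.lower()
--     best = None
--     for i in range(len(n)):
--         for pat, prio in PATTERNS:
--             if (best is None or prio < best) and n.startswith(pat, i):
--                 best = prio
--     return 5000 if best is None else AMOUNTS[best]
-- ===== Notes on version B (the rewrite author's own statement) =====
-- stated objective: alternative
-- what changed: Replaces A's cascade of independent substring searches with a single position-major scan of the lowercased name that tests all patterns at each index and keeps the lowest matched priority in an accumulator, mapped through a priority-to-amount table (default 5000).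
import Mathlib
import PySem

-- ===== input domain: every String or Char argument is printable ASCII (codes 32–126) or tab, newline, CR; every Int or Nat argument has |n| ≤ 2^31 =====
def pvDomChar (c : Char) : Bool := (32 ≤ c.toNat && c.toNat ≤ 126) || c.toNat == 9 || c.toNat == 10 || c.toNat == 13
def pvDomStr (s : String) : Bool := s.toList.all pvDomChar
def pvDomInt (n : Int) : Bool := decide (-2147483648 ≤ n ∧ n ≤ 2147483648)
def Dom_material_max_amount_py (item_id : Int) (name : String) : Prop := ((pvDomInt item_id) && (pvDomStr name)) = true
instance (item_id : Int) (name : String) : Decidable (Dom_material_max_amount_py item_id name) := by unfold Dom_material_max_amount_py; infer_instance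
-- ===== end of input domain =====

-- B replaces A's cascade of substring searches by one position-major scan of the lowercased name keeping the lowest matched priority (alternative traversal; not faster).


-- ===== PORT A =====
def material_max_amount_py (item_id : Int) (name : String) : Int :=
  if ([999001, 999002, 999003, 999004] : List Int).contains item_id then 0
  else
    let n := PySem.Str.lower name
    if PySem.Str.isIn "longing flicker" n then 0
    else if PySem.Str.isIn "recalling light" n then 0
    else if PySem.Str.isIn "awakening stone" n || PySem.Str.isIn "a. stone" n then 5
    else if (["battle text", "b. text", "peaceful text", "warfare text", "w. text"] : List String).any
              (fun p => PySem.Str.isIn p n) then 100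
    else if PySem.Str.isIn "enhancement" n then 50000
    else if PySem.Str.isIn "slab fragment" n || PySem.Str.isIn "antler bit" n then 20000
    else 5000

-- ===== PORT B =====
-- the pattern table of Source B: (pattern, priority)
def pvPatterns : List (List Char × Nat) :=
  [("longing flicker".toList, 0), ("recalling light".toList, 0),
   ("awakening stone".toList, 1), ("a. stone".toList, 1),
   ("battle text".toList, 2), ("b. text".toList, 2), ("peaceful text".toList, 2),
   ("warfare text".toList, 2), ("w. text".toList, 2),
   ("enhancement".toList, 3),
   ("slab fragment".toList, 4), ("antler bit".toList, 4)]

-- Source B's AMOUNTS tuple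
def pvAmounts : List Int := [0, 5, 100, 50000, 20000]

-- one step of Source B's inner loop body: 'if (best is None or prio < best) and <hit>: best = prio'
def pvUpd (best : Option Nat) (prio : Nat) (hit : Bool) : Option Nat :=
  if (best.elim true (fun v => prio < v)) && hit then some prio else best

def material_max_amount_py_alt (item_id : Int) (name : String) : Int :=
  if ([999001, 999002, 999003, 999004] : List Int).contains item_id then 0
  else
    let l := (PySem.Str.lower name).toList
    let best := (List.range l.length).foldl
      (fun b i => pvPatterns.foldl
        (fun b pp => pvUpd b pp.2 (PySem.Chars.startswith (l.drop i) pp.1)) b) none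
    match best with
    | some k => pvAmounts.getD k 0  -- AMOUNTS[best]; best is always ≤ 4, so in range
    | none => 5000

-- ===== PRECONDITION & SPEC =====
def Spec_material_max_amount_py (item_id : Int) (name : String) (out : Int) : Prop := out = material_max_amount_py_alt item_id name
instance (item_id : Int) (name : String) (out : Int) : Decidable (Spec_material_max_amount_py item_id name out) := by unfold Spec_material_max_amount_py; infer_instance

-- ===== CLAIM (what is proved, stated in full; the proofs are below) =====
def Claim_equal_material_max_amount_py : Prop := ∀ (item_id : Int) (name : String), Dom_material_max_amount_py item_id name → Spec_material_max_amount_py item_id name (material_max_amount_py item_id name)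

-- ===== LEMMAS AND PROOFS =====

-- pvVal maps B's accumulator to a number (none = sentinel 5, above every priority)
def pvVal : Option Nat → Nat
  | none => 5
  | some k => k

-- min-fold model of the accumulator over a flattened list of (priority, hit) cells
def pvG (v : Nat) (C : List (Nat × Bool)) : Nat :=
  C.foldl (fun v c => if c.2 then min v c.1 else v) v

-- the flattened cell list of B's two nested loops
def pvCells (l : List Char) : List (Nat × Bool) :=
  (List.range l.length).flatMap
    (fun i => pvPatterns.map (fun pp => (pp.2, PySem.Chars.startswith (l.drop i) pp.1)))

lemma pvG_step (c : Nat × Bool) (C : List (Nat × Bool)) (v : Nat) :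
    pvG v (c :: C) = pvG (if c.2 then min v c.1 else v) C := rfl

lemma pvG_le_init (C : List (Nat × Bool)) : ∀ (v : Nat), pvG v C ≤ v := by
  induction C with
  | nil => intro v; simp [pvG]
  | cons c C ih =>
    intro v
    rw [pvG_step]
    split
    · exact le_trans (ih _) (Nat.min_le_left _ _)
    · exact ih v

lemma pvG_le (C : List (Nat × Bool)) : ∀ (v p : Nat), (p, true) ∈ C → pvG v C ≤ p := by
  induction C with
  | nil => intro v p h; cases h
  | cons c C ih =>
    intro v p h
    rw [pvG_step]
    rcases List.mem_cons.mp h with h | h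
    · rw [← h]; simp only
      exact le_trans (pvG_le_init _ _) (Nat.min_le_right _ _)
    · split <;> exact ih _ p h

lemma pvG_mem (C : List (Nat × Bool)) : ∀ (v : Nat),
    pvG v C = v ∨ ∃ p, (p, true) ∈ C ∧ pvG v C = p := by
  induction C with
  | nil => intro v; left; simp [pvG]
  | cons c C ih =>
    intro v
    rw [pvG_step]
    by_cases hc : c.2 = true
    · simp only [hc, if_true]
      rcases ih (min v c.1) with h | ⟨p, hp, hval⟩
      · rw [h]
        rcases Nat.le_total v c.1 with hle | hle
        · left; omega
        · right
          refine ⟨c.1, ?_, by omega⟩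
          exact List.mem_cons.mpr (Or.inl (by rw [← hc]))
      · right; exact ⟨p, List.mem_cons_of_mem _ hp, hval⟩
    · simp only [hc]
      rcases ih v with h | ⟨p, hp, hval⟩
      · left; exact h
      · right; exact ⟨p, List.mem_cons_of_mem _ hp, hval⟩

-- the pvUpd fold agrees with the min-fold model through pvVal, and stays in {none} ∪ {some p | p ≤ 4}
lemma pv_fold_shape (C : List (Nat × Bool)) : ∀ (b : Option Nat),
    (∀ p, (p, true) ∈ C → p ≤ 4) →
    (b = none ∨ ∃ v, v ≤ 4 ∧ b = some v) →
    (C.foldl (fun b c => pvUpd b c.1 c.2) b = none ∨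
      ∃ p, p ≤ 4 ∧ C.foldl (fun b c => pvUpd b c.1 c.2) b = some p) ∧
    pvVal (C.foldl (fun b c => pvUpd b c.1 c.2) b) = pvG (pvVal b) C := by
  induction C with
  | nil => intro b _ hb; exact ⟨hb, rfl⟩
  | cons c C ih =>
    intro b hmem hb
    have hmem' : ∀ p, (p, true) ∈ C → p ≤ 4 := fun p h => hmem p (List.mem_cons_of_mem _ h)
    have hb' : pvUpd b c.1 c.2 = none ∨ ∃ v, v ≤ 4 ∧ pvUpd b c.1 c.2 = some v := by
      unfold pvUpd
      split
      · rename_i h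
        right
        refine ⟨c.1, ?_, rfl⟩
        have : c.2 = true := by
          cases hcc : c.2 <;> simp [hcc] at h ⊢
        exact hmem c.1 (by rw [← this]; exact List.mem_cons_self)
      · exact hb
    have hval : pvVal (pvUpd b c.1 c.2) = if c.2 then min (pvVal b) c.1 else pvVal b := by
      unfold pvUpd
      rcases hb with rfl | ⟨v, hv4, rfl⟩
      · cases hcc : c.2
        · simp [pvVal]
        · have h4 : c.1 ≤ 4 := hmem c.1 (by rw [← hcc]; exact List.mem_cons_self)
          simp [pvVal]
          omega
      · cases hcc : c.2
        · simp [pvVal]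
        · by_cases h : c.1 < v <;> simp [h, pvVal] <;> omega
    have := ih (pvUpd b c.1 c.2) hmem' hb'
    refine ⟨this.1, ?_⟩
    rw [List.foldl_cons, this.2, hval, pvG_step]

-- membership in the flattened cell list ↔ some pattern of that priority occurs in l
lemma pv_mem_cells (l : List Char) (p : Nat) :
    ((p, true) ∈ pvCells l) ↔
      ∃ pp, pp ∈ pvPatterns ∧ pp.2 = p ∧ PySem.Chars.isIn pp.1 l = true := by
  unfold pvCells
  simp only [List.mem_flatMap, List.mem_map, List.mem_range, Prod.mk.injEq]
  constructor
  · rintro ⟨i, hi, pp, hpp, hp, hsw⟩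
    refine ⟨pp, hpp, hp, ?_⟩
    rw [← PySem.Chars.exists_prefix_drop_iff_isIn]
    exact ⟨i, (PySem.Chars.startswith_iff _ _).mp hsw⟩
  · rintro ⟨pp, hpp, hp, hin⟩
    have hne : pp.1 ≠ [] := by
      fin_cases hpp <;> simp
    rw [← PySem.Chars.exists_prefix_drop_iff_isIn] at hin
    rcases hin with ⟨j, hj⟩
    have hjlt : j < l.length := by
      by_contra hge
      have : l.drop j = [] := List.drop_eq_nil_of_le (by omega)
      rw [this] at hj
      exact hne (List.prefix_nil.mp hj)
    exact ⟨j, hjlt, pp, hpp, hp, (PySem.Chars.startswith_iff _ _).mpr hj⟩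

-- grouped form of cell membership, by priority
lemma pv_group_mem (l : List Char) (p : Nat) :
    ((p, true) ∈ pvCells l) ↔
      (p = 0 ∧ (PySem.Chars.isIn "longing flicker".toList l = true ∨
                PySem.Chars.isIn "recalling light".toList l = true)) ∨
      (p = 1 ∧ (PySem.Chars.isIn "awakening stone".toList l = true ∨
                PySem.Chars.isIn "a. stone".toList l = true)) ∨
      (p = 2 ∧ (PySem.Chars.isIn "battle text".toList l = true ∨
                PySem.Chars.isIn "b. text".toList l = true ∨
                PySem.Chars.isIn "peaceful text".toList l = true ∨
                PySem.Chars.isIn "warfare text".toList l = true ∨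
                PySem.Chars.isIn "w. text".toList l = true)) ∨
      (p = 3 ∧ PySem.Chars.isIn "enhancement".toList l = true) ∨
      (p = 4 ∧ (PySem.Chars.isIn "slab fragment".toList l = true ∨
                PySem.Chars.isIn "antler bit".toList l = true)) := by
  rw [pv_mem_cells]
  constructor
  · rintro ⟨pp, hpp, rfl, hin⟩
    fin_cases hpp
    exacts [Or.inl ⟨rfl, Or.inl hin⟩,
            Or.inl ⟨rfl, Or.inr hin⟩,
            Or.inr (Or.inl ⟨rfl, Or.inl hin⟩),
            Or.inr (Or.inl ⟨rfl, Or.inr hin⟩),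
            Or.inr (Or.inr (Or.inl ⟨rfl, Or.inl hin⟩)),
            Or.inr (Or.inr (Or.inl ⟨rfl, Or.inr (Or.inl hin)⟩)),
            Or.inr (Or.inr (Or.inl ⟨rfl, Or.inr (Or.inr (Or.inl hin))⟩)),
            Or.inr (Or.inr (Or.inl ⟨rfl, Or.inr (Or.inr (Or.inr (Or.inl hin)))⟩)),
            Or.inr (Or.inr (Or.inl ⟨rfl, Or.inr (Or.inr (Or.inr (Or.inr hin)))⟩)),
            Or.inr (Or.inr (Or.inr (Or.inl ⟨rfl, hin⟩))),
            Or.inr (Or.inr (Or.inr (Or.inr ⟨rfl, Or.inl hin⟩))),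
            Or.inr (Or.inr (Or.inr (Or.inr ⟨rfl, Or.inr hin⟩)))]
  · rintro (⟨rfl, (h | h)⟩ | ⟨rfl, (h | h)⟩ | ⟨rfl, (h | h | h | h | h)⟩ | ⟨rfl, h⟩ | ⟨rfl, (h | h)⟩)
    exacts [⟨("longing flicker".toList, 0), by simp [pvPatterns], rfl, h⟩,
            ⟨("recalling light".toList, 0), by simp [pvPatterns], rfl, h⟩,
            ⟨("awakening stone".toList, 1), by simp [pvPatterns], rfl, h⟩,
            ⟨("a. stone".toList, 1), by simp [pvPatterns], rfl, h⟩,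
            ⟨("battle text".toList, 2), by simp [pvPatterns], rfl, h⟩,
            ⟨("b. text".toList, 2), by simp [pvPatterns], rfl, h⟩,
            ⟨("peaceful text".toList, 2), by simp [pvPatterns], rfl, h⟩,
            ⟨("warfare text".toList, 2), by simp [pvPatterns], rfl, h⟩,
            ⟨("w. text".toList, 2), by simp [pvPatterns], rfl, h⟩,
            ⟨("enhancement".toList, 3), by simp [pvPatterns], rfl, h⟩,
            ⟨("slab fragment".toList, 4), by simp [pvPatterns], rfl, h⟩,
            ⟨("antler bit".toList, 4), by simp [pvPatterns], rfl, h⟩]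

-- bridge: Str.isIn ↔ Chars.isIn on toLists
lemma pv_isIn_bridge (pat s : String) :
    PySem.Str.isIn pat s = PySem.Chars.isIn pat.toList s.toList := by
  cases h : PySem.Chars.isIn pat.toList s.toList
  · rw [PySem.Chars.isIn_eq_false_iff] at h
    cases hs : PySem.Str.isIn pat s
    · rfl
    · exact absurd ((PySem.Str.isIn_iff_infix _ _).mp hs) h
  · rw [PySem.Chars.isIn_iff_infix] at h
    exact (PySem.Str.isIn_iff_infix _ _).mpr h

-- priorities occurring matched in the cell list are ≤ 4
lemma pv_cells_le (l : List Char) (p : Nat) (h : (p, true) ∈ pvCells l) : p ≤ 4 := by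
  rcases (pv_mem_cells l p).mp h with ⟨pp, hpp, hp, _⟩
  fin_cases hpp <;> omega

-- B's nested loops are the fold over the flattened cell list
lemma pv_flat (l : List Char) :
    (List.range l.length).foldl
      (fun b i => pvPatterns.foldl
        (fun b pp => pvUpd b pp.2 (PySem.Chars.startswith (l.drop i) pp.1)) b) none
    = (pvCells l).foldl (fun b c => pvUpd b c.1 c.2) none := by
  unfold pvCells
  rw [List.foldl_flatMap]
  simp only [List.foldl_map]

lemma pvG_eq_of (l : List Char) (k : Nat)
    (hmem : (k, true) ∈ pvCells l)
    (hlow : ∀ p, (p, true) ∈ pvCells l → k ≤ p) :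
    pvG 5 (pvCells l) = k := by
  have h1 := pvG_le (pvCells l) 5 k hmem
  rcases pvG_mem (pvCells l) 5 with h | ⟨p, hp, he⟩
  · have := hlow k hmem
    have := pv_cells_le l k hmem
    omega
  · have := hlow p hp
    omega

lemma pvG_eq_five (l : List Char) (hnone : ∀ p, (p, true) ∉ pvCells l) :
    pvG 5 (pvCells l) = 5 := by
  rcases pvG_mem (pvCells l) 5 with h | ⟨p, hp, _⟩
  · exact h
  · exact absurd hp (hnone p)

-- value of B's fold-match, given the min-priority value
lemma pv_value (l : List Char) (k : Nat) (hk : k ≤ 4)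
    (hG : pvG 5 (pvCells l) = k) :
    (match (pvCells l).foldl (fun b c => pvUpd b c.1 c.2) none with
      | some j => pvAmounts.getD j 0
      | none => (5000 : Int)) = pvAmounts.getD k 0 := by
  obtain ⟨hsh, hval⟩ := pv_fold_shape (pvCells l) none (fun p h => pv_cells_le l p h) (Or.inl rfl)
  rcases hsh with hre | ⟨p, hp4, hre⟩
  · rw [hre] at hval
    rw [show pvVal (none : Option Nat) = 5 from rfl, hG] at hval
    exact absurd hval (by omega)
  · rw [hre] at hval ⊢
    have hpk : p = k := by
      rw [show pvVal (some p) = p from rfl,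
          show pvVal (none : Option Nat) = 5 from rfl, hG] at hval
      exact hval
    rw [hpk]

lemma pv_value_none (l : List Char)
    (hG : pvG 5 (pvCells l) = 5) :
    (match (pvCells l).foldl (fun b c => pvUpd b c.1 c.2) none with
      | some j => pvAmounts.getD j 0
      | none => (5000 : Int)) = 5000 := by
  obtain ⟨hsh, hval⟩ := pv_fold_shape (pvCells l) none (fun p h => pv_cells_le l p h) (Or.inl rfl)
  rcases hsh with hre | ⟨p, hp4, hre⟩
  · rw [hre]
  · rw [hre] at hval ⊢
    rw [show pvVal (some p) = p from rfl,
        show pvVal (none : Option Nat) = 5 from rfl, hG] at hval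
    exact absurd hval (by omega)

-- the core equation over the lowercased character list
set_option maxHeartbeats 1000000 in
lemma pv_core (l : List Char) :
    (match (List.range l.length).foldl
        (fun b i => pvPatterns.foldl
          (fun b pp => pvUpd b pp.2 (PySem.Chars.startswith (l.drop i) pp.1)) b) none with
      | some k => pvAmounts.getD k 0
      | none => (5000 : Int))
    = (if PySem.Chars.isIn "longing flicker".toList l then 0
       else if PySem.Chars.isIn "recalling light".toList l then 0
       else if PySem.Chars.isIn "awakening stone".toList l || PySem.Chars.isIn "a. stone".toList l then 5
       else if PySem.Chars.isIn "battle text".toList l ||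
               (PySem.Chars.isIn "b. text".toList l ||
                (PySem.Chars.isIn "peaceful text".toList l ||
                 (PySem.Chars.isIn "warfare text".toList l ||
                  PySem.Chars.isIn "w. text".toList l))) then 100
       else if PySem.Chars.isIn "enhancement".toList l then 50000
       else if PySem.Chars.isIn "slab fragment".toList l || PySem.Chars.isIn "antler bit".toList l then 20000
       else 5000) := by
  rw [pv_flat]
  split_ifs with h0a h0b h1 h2 h3 h4
  · rw [pv_value l 0 (by omega)
      (pvG_eq_of l 0 ((pv_group_mem l 0).mpr (Or.inl ⟨rfl, Or.inl h0a⟩))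
        (fun p _ => Nat.zero_le p))]
    rfl
  · rw [pv_value l 0 (by omega)
      (pvG_eq_of l 0 ((pv_group_mem l 0).mpr (Or.inl ⟨rfl, Or.inr h0b⟩))
        (fun p _ => Nat.zero_le p))]
    rfl
  · rw [Bool.or_eq_true] at h1
    rw [pv_value l 1 (by omega)
      (pvG_eq_of l 1 ((pv_group_mem l 1).mpr (Or.inr (Or.inl ⟨rfl, h1⟩))) ?_)]
    · rfl
    · intro p hp
      rcases (pv_group_mem l p).mp hp with ⟨rfl, hc⟩ | ⟨rfl, _⟩ | ⟨rfl, _⟩ | ⟨rfl, _⟩ | ⟨rfl, _⟩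
      · rcases hc with hc | hc
        · exact absurd hc h0a
        · exact absurd hc h0b
      all_goals omega
  · simp only [Bool.or_eq_true] at h2
    simp only [Bool.or_eq_true] at h1
    rw [not_or] at h1
    rw [pv_value l 2 (by omega)
      (pvG_eq_of l 2 ((pv_group_mem l 2).mpr (Or.inr (Or.inr (Or.inl ⟨rfl, h2⟩)))) ?_)]
    · rfl
    · intro p hp
      rcases (pv_group_mem l p).mp hp with ⟨rfl, hc⟩ | ⟨rfl, hc⟩ | ⟨rfl, _⟩ | ⟨rfl, _⟩ | ⟨rfl, _⟩
      · rcases hc with hc | hc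
        · exact absurd hc h0a
        · exact absurd hc h0b
      · rcases hc with hc | hc
        · exact absurd hc h1.1
        · exact absurd hc h1.2
      all_goals omega
  · simp only [Bool.or_eq_true] at h1 h2
    rw [not_or] at h1
    rw [not_or, not_or, not_or, not_or] at h2
    rw [pv_value l 3 (by omega)
      (pvG_eq_of l 3 ((pv_group_mem l 3).mpr (Or.inr (Or.inr (Or.inr (Or.inl ⟨rfl, h3⟩))))) ?_)]
    · rfl
    · intro p hp
      rcases (pv_group_mem l p).mp hp with ⟨rfl, hc⟩ | ⟨rfl, hc⟩ | ⟨rfl, hc⟩ | ⟨rfl, _⟩ | ⟨rfl, _⟩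
      · rcases hc with hc | hc
        · exact absurd hc h0a
        · exact absurd hc h0b
      · rcases hc with hc | hc
        · exact absurd hc h1.1
        · exact absurd hc h1.2
      · rcases hc with hc | hc | hc | hc | hc
        exacts [absurd hc h2.1, absurd hc h2.2.1, absurd hc h2.2.2.1,
                absurd hc h2.2.2.2.1, absurd hc h2.2.2.2.2]
      all_goals omega
  · simp only [Bool.or_eq_true] at h1 h2 h4
    rw [not_or] at h1
    rw [not_or, not_or, not_or, not_or] at h2
    rw [pv_value l 4 (by omega)
      (pvG_eq_of l 4 ((pv_group_mem l 4).mpr (Or.inr (Or.inr (Or.inr (Or.inr ⟨rfl, h4⟩))))) ?_)]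
    · rfl
    · intro p hp
      rcases (pv_group_mem l p).mp hp with ⟨rfl, hc⟩ | ⟨rfl, hc⟩ | ⟨rfl, hc⟩ | ⟨rfl, hc⟩ | ⟨rfl, _⟩
      · rcases hc with hc | hc
        · exact absurd hc h0a
        · exact absurd hc h0b
      · rcases hc with hc | hc
        · exact absurd hc h1.1
        · exact absurd hc h1.2
      · rcases hc with hc | hc | hc | hc | hc
        exacts [absurd hc h2.1, absurd hc h2.2.1, absurd hc h2.2.2.1,
                absurd hc h2.2.2.2.1, absurd hc h2.2.2.2.2]
      · exact absurd hc h3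
      · omega
  · simp only [Bool.or_eq_true] at h1 h2 h4
    rw [not_or] at h1
    rw [not_or, not_or, not_or, not_or] at h2
    rw [not_or] at h4
    refine pv_value_none l (pvG_eq_five l ?_)
    intro p hp
    rcases (pv_group_mem l p).mp hp with ⟨rfl, hc⟩ | ⟨rfl, hc⟩ | ⟨rfl, hc⟩ | ⟨rfl, hc⟩ | ⟨rfl, hc⟩
    · rcases hc with hc | hc
      · exact absurd hc h0a
      · exact absurd hc h0b
    · rcases hc with hc | hc
      · exact absurd hc h1.1
      · exact absurd hc h1.2
    · rcases hc with hc | hc | hc | hc | hc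
      exacts [absurd hc h2.1, absurd hc h2.2.1, absurd hc h2.2.2.1,
              absurd hc h2.2.2.2.1, absurd hc h2.2.2.2.2]
    · exact absurd hc h3
    · rcases hc with hc | hc
      · exact absurd hc h4.1
      · exact absurd hc h4.2

-- ===== VERDICT (by name: the statement is the Claim_ definition above) =====
set_option maxHeartbeats 1000000 in
theorem material_max_amount_py_spec : Claim_equal_material_max_amount_py := by
  intro item_id name _
  unfold Spec_material_max_amount_py material_max_amount_py material_max_amount_py_alt
  by_cases hid : ([999001, 999002, 999003, 999004] : List Int).contains item_id
  · simp only [hid, if_true]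
  · simp only [hid, Bool.false_eq_true, if_false, pv_isIn_bridge,
      List.any_cons, List.any_nil, Bool.or_false]
    exact (pv_core (PySem.Str.lower name).toList).symm
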